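-- pv_equiv track=rewrite | github.com/ACSE-vg822/semantic-search-engine-sheets | src/data_ingestion/spreadsheet_parser.py | _detect_data_ranges
-- ===== SOURCE A (Python) =====
-- from typing import Dict, List, Optional, Tuple, Any
--
-- def _detect_data_ranges(values: List[List[str]]) -> List[Tuple[int, int, int, int]]:
--     non_empty_rows = [i for i, row in enumerate(values) if any(cell.strip() for cell in row)]
--     if not non_empty_rows:
--         return []
--     start_row, end_row = non_empty_rows[0], non_empty_rows[-1]
--     max_cols = max(len(row) for row in values)
--     start_col, end_col = 0, max_cols - 1
--     return [(start_row + 1, end_row + 1, start_col + 1, end_col + 1)]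
-- ===== SOURCE B (Python) =====
-- from typing import List, Tuple
--
-- def _count_blank_prefix(rows: List[List[str]]) -> int:
--     k = 0
--     for row in rows:
--         if any(cell.strip() for cell in row):
--             break
--         k += 1
--     return k
--
-- def _detect_data_ranges(values: List[List[str]]) -> List[Tuple[int, int, int, int]]:
--     n = len(values)
--     lead = _count_blank_prefix(values)
--     if lead == n:
--         return []
--     trail = _count_blank_prefix(values[::-1])
--     width = max(len(row) for row in values)
--     return [(lead + 1, n - trail, 1, width)]
-- ===== Notes on version B (the rewrite author's own statement) =====
-- stated objective: alternative
-- what changed: Instead of enumerating all non-empty row indices and taking first/last, B trims blank rows from both ends: it counts the blank prefix of the list and of its reversal, so the bounding rows are lead and n-trail-1 and middle rows are never blank-tested.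
import Mathlib
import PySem

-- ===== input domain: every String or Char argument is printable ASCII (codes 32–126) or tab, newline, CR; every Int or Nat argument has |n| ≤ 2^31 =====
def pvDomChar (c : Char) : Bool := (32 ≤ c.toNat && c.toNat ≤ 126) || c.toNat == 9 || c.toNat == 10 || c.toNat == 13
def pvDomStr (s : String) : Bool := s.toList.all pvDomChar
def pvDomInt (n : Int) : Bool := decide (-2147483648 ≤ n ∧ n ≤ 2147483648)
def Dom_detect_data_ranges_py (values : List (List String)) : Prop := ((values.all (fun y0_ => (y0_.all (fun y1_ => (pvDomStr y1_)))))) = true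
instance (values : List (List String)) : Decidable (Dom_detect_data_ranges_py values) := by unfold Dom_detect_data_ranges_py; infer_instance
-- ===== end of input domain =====

-- B trims blank rows from both ends (blank prefix of the list and of its reversal) instead of
-- enumerating all non-empty row indices; same return value, different decomposition.

-- `any(cell.strip() for cell in row)` — truthiness of a string is non-emptiness (both Pythons use this expression)
def pvRowNonEmpty (row : List String) : Bool := row.any (fun c => !(PySem.Str.strip c == ""))

-- ===== PORT A =====
-- A's comprehension `[i for i, row in enumerate(values) if any(cell.strip() for cell in row)]`
def pvNer (values : List (List String)) (i : Int) : List Int :=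
  ((PySem.List.enumerate values i).filter (fun p => pvRowNonEmpty p.2)).map (fun p => p.1)

def detect_data_ranges_py (values : List (List String)) : List (Int × Int × Int × Int) :=
  match pvNer values 0 with
  | [] => []
  | start_row :: rest =>
    let end_row : Int := (rest.getLast?).getD start_row   -- non_empty_rows[-1]
    let max_cols : Int := (PySem.List.max? (values.map (fun r => (r.length : Int))) (fun x => x)).getD 0
    let start_col : Int := 0
    let end_col : Int := max_cols - 1
    [(start_row + 1, end_row + 1, start_col + 1, end_col + 1)]

-- ===== PORT B =====
-- Source B's `_count_blank_prefix`: rows scanned in order, stop at the first non-blank one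
def pvCBP : List (List String) → Int
  | [] => 0
  | r :: t => if pvRowNonEmpty r then 0 else pvCBP t + 1

def detect_data_ranges_py_alt (values : List (List String)) : List (Int × Int × Int × Int) :=
  let n : Int := values.length
  let lead : Int := pvCBP values
  if lead == n then []
  else
    let trail : Int := pvCBP values.reverse        -- values[::-1]
    let width : Int := (PySem.List.max? (values.map (fun r => (r.length : Int))) (fun x => x)).getD 0
    [(lead + 1, n - trail, 1, width)]

-- ===== PRECONDITION & SPEC =====
def Spec_detect_data_ranges_py (values : List (List String)) (out : List (Int × Int × Int × Int)) : Prop := out = detect_data_ranges_py_alt values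
instance (values : List (List String)) (out : List (Int × Int × Int × Int)) : Decidable (Spec_detect_data_ranges_py values out) := by unfold Spec_detect_data_ranges_py; infer_instance

-- ===== CLAIM (what is proved, stated in full; the proofs are below) =====
def Claim_equal_detect_data_ranges_py : Prop := ∀ (values : List (List String)), Dom_detect_data_ranges_py values → Spec_detect_data_ranges_py values (detect_data_ranges_py values)

-- ===== LEMMAS AND PROOFS =====

theorem pvNer_cons (r : List String) (vs : List (List String)) (i : Int) :
    pvNer (r :: vs) i = if pvRowNonEmpty r then i :: pvNer vs (i + 1) else pvNer vs (i + 1) := by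
  simp only [pvNer, PySem.List.enumerate_cons, List.filter_cons]
  split <;> simp

theorem pvNer_append (xs ys : List (List String)) (i : Int) :
    pvNer (xs ++ ys) i = pvNer xs i ++ pvNer ys (i + xs.length) := by
  induction xs generalizing i with
  | nil => simp [pvNer]
  | cons r t ih =>
    simp only [List.cons_append, pvNer_cons, ih, List.length_cons]
    have : i + 1 + (t.length : Int) = i + ((t.length : Int) + 1) := by omega
    rw [this]
    split <;> simp

-- blank-prefix count = list length ↔ no non-empty row at all
theorem pvNer_nil_iff (xs : List (List String)) (i : Int) :
    pvNer xs i = [] ↔ pvCBP xs = (xs.length : Int) := by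
  induction xs generalizing i with
  | nil => simp [pvNer, pvCBP]
  | cons r t ih =>
    have hle : pvCBP t ≤ (t.length : Int) ∧ 0 ≤ pvCBP t := by
      clear ih; induction t with
      | nil => simp [pvCBP]
      | cons a b ihb =>
        simp only [pvCBP, List.length_cons]
        push_cast at ihb ⊢
        split <;> omega
    rw [pvNer_cons]
    by_cases h : pvRowNonEmpty r = true
    · simp only [h, if_pos, pvCBP, List.length_cons]
      constructor
      · intro hc; cases hc
      · intro hc; push_cast at hc; omega
    · simp only [h, Bool.false_eq_true, if_false, pvCBP, List.length_cons, ih]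
      push_cast; omega

theorem pvNer_head (xs : List (List String)) (i s : Int) (rest : List Int)
    (h : pvNer xs i = s :: rest) : s = i + pvCBP xs := by
  induction xs generalizing i s rest with
  | nil => simp [pvNer] at h
  | cons r t ih =>
    rw [pvNer_cons] at h
    by_cases hr : pvRowNonEmpty r = true
    · rw [hr, if_pos rfl] at h
      cases h; simp [pvCBP, hr]
    · simp only [hr, Bool.false_eq_true, if_false] at h
      have := ih (i + 1) s rest h
      simp only [pvCBP, hr, Bool.false_eq_true, if_false]
      omega

theorem pvNer_last (xs : List (List String)) (i : Int)
    (h : pvNer xs i ≠ []) :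
    (pvNer xs i).getLast? = some (i + (xs.length : Int) - 1 - pvCBP xs.reverse) := by
  induction xs using List.reverseRecOn generalizing i with
  | nil => simp [pvNer] at h
  | append_singleton zs r ih =>
    rw [pvNer_append] at h ⊢
    have hrev : (zs ++ [r]).reverse = r :: zs.reverse := by simp
    by_cases hr : pvRowNonEmpty r = true
    · have hone : pvNer [r] (i + (zs.length : Int)) = [i + (zs.length : Int)] := by
        simp [hr, pvNer]
      rw [hone, List.getLast?_append_cons]
      simp [hrev, pvCBP, hr, List.length_append]
      omega
    · have hone : pvNer [r] (i + (zs.length : Int)) = [] := by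
        simp [hr, pvNer]
      rw [hone, List.append_nil] at h ⊢
      rw [ih i h, hrev]
      simp only [pvCBP, hr, Bool.false_eq_true, if_false, List.length_append, List.length_singleton]
      congr 1
      push_cast; omega

-- ===== VERDICT (by name: the statement is the Claim_ definition above) =====
theorem detect_data_ranges_py_spec : Claim_equal_detect_data_ranges_py := by
  intro values _
  show detect_data_ranges_py values = detect_data_ranges_py_alt values
  unfold detect_data_ranges_py detect_data_ranges_py_alt
  cases hne : pvNer values 0 with
  | nil =>
    have := (pvNer_nil_iff values 0).mp hne
    simp [this]
  | cons s rest =>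
    have hnenil : pvNer values 0 ≠ [] := by rw [hne]; simp
    have hcbp : pvCBP values ≠ (values.length : Int) := by
      intro hc
      exact hnenil ((pvNer_nil_iff values 0).mpr hc)
    have hhead : s = 0 + pvCBP values := pvNer_head values 0 s rest hne
    have hlast := pvNer_last values 0 hnenil
    rw [hne] at hlast
    simp only [beq_iff_eq, hcbp, if_false]
    have hrest : (rest.getLast?).getD s = 0 + (values.length : Int) - 1 - pvCBP values.reverse := by
      cases hr : rest with
      | nil =>
        rw [hr] at hlast
        simp only [List.getLast?_singleton, Option.some.injEq] at hlast
        simpa using hlast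
      | cons a b =>
        rw [hr, List.getLast?_cons_cons] at hlast
        rw [hlast]
        simp
    rw [hrest, hhead]
    simp only [List.cons.injEq, Prod.mk.injEq, and_true]
    omega
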